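-- pv_equiv track=rewrite | github.com/uflowie/aoc_2022 | 15/15_solution.py | get_beaconless_points_on_line_with_ranges
-- ===== SOURCE A (Python) =====
-- def manhattan_distance(p1, p2):
-- 	return abs(p1[0] - p2[0]) + abs(p1[1] - p2[1])
--
-- def get_beaconless_points_on_line_with_ranges(sensors, beacons, line_y, max_range):
-- 	intersection_ranges = []
-- 	for sensor, beacon in zip(sensors, beacons):
-- 		intersection_range = get_intersection_range(sensor, beacon, line_y, max_range)
-- 		if intersection_range is not None:
-- 			intersection_ranges.append(intersection_range)
-- 	# merge intersection ranges
-- 	intersection_ranges.sort(key=lambda x: x[0])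
-- 	curr = intersection_ranges[0]
-- 	for intersection_range in intersection_ranges[1:]:
-- 		if curr[1] + 1 < intersection_range[0]:
-- 			return {curr[1] + 1, line_y}
-- 		else:
-- 			curr = (curr[0], max(curr[1], intersection_range[1]))
-- 	return None
--
-- def get_intersection_range(sensor, beacon, line_y, max_range):
-- 	distance = manhattan_distance(sensor, beacon)
-- 	if abs(sensor[1] - line_y) > distance:
-- 		return None
-- 	else:
-- 		return (max(0, sensor[0] - distance + abs(sensor[1] - line_y)), min(max_range, sensor[0] + distance - abs(sensor[1] - line_y)))
-- ===== SOURCE B (Python) =====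
-- def manhattan_distance(p1, p2):
-- 	return abs(p1[0] - p2[0]) + abs(p1[1] - p2[1])
--
-- def get_intersection_range(sensor, beacon, line_y, max_range):
-- 	distance = manhattan_distance(sensor, beacon)
-- 	if abs(sensor[1] - line_y) > distance:
-- 		return None
-- 	else:
-- 		return (max(0, sensor[0] - distance + abs(sensor[1] - line_y)), min(max_range, sensor[0] + distance - abs(sensor[1] - line_y)))
--
-- def get_beaconless_points_on_line_with_ranges(sensors, beacons, line_y, max_range):
-- 	ranges = []
-- 	for sensor, beacon in zip(sensors, beacons):
-- 		r = get_intersection_range(sensor, beacon, line_y, max_range)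
-- 		if r is not None:
-- 			ranges.append(r)
-- 	# sort-free: the seed is the leftmost interval (first one with minimal start)
-- 	start = ranges[0]
-- 	for r in ranges[1:]:
-- 		if r[0] < start[0]:
-- 			start = r
-- 	others = list(ranges)
-- 	others.remove(start)
-- 	# grow the covered block containing the seed to a fixpoint (saturation passes)
-- 	end = start[1]
-- 	changed = True
-- 	while changed:
-- 		changed = False
-- 		for lo, hi in ranges:
-- 			if lo <= end + 1 and end < hi:
-- 				end = hi
-- 				changed = True
-- 	# a gap exists iff some other interval starts strictly beyond the block
-- 	if any(lo > end + 1 for lo, hi in others):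
-- 		return {end + 1, line_y}
-- 	return None
-- ===== Notes on version B (the rewrite author's own statement) =====
-- stated objective: alternative
-- what changed: A sorts the per-sensor intervals and sweeps them left-to-right, returning at the first gap; B never sorts: it seeds with the leftmost interval, grows the covered block containing it to a fixpoint by repeated saturation passes over the unsorted list, and reports the point after the block iff some other interval starts beyond it.
import Mathlib
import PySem

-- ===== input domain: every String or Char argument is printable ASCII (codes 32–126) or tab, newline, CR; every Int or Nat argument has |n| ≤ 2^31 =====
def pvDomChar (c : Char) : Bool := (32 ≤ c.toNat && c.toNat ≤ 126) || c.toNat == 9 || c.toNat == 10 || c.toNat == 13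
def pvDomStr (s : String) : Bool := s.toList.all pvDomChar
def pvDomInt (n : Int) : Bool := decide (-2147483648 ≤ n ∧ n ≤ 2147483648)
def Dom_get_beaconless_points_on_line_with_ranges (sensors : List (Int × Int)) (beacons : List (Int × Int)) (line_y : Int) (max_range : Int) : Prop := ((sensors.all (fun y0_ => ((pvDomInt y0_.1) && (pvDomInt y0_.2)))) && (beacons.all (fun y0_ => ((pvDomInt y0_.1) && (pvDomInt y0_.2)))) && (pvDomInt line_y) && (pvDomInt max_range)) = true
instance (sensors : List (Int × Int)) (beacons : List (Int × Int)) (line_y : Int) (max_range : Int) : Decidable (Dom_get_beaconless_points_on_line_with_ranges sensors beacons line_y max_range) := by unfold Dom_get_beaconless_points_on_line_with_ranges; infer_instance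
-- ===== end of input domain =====

-- ===== PORT A =====
-- B replaces A's sort-and-sweep with a sort-free algorithm: seed at the leftmost
-- interval, grow its covered block to a fixpoint by saturation passes, then report
-- the point after the block iff some other interval starts beyond it.
def pvManhattan (p1 p2 : Int × Int) : Int := |p1.1 - p2.1| + |p1.2 - p2.2|

def pvGetIntersectionRange (sensor beacon : Int × Int) (line_y max_range : Int) : Option (Int × Int) :=
  let distance := pvManhattan sensor beacon
  if |sensor.2 - line_y| > distance then none
  else some (max 0 (sensor.1 - distance + |sensor.2 - line_y|),
             min max_range (sensor.1 + distance - |sensor.2 - line_y|))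

-- the shared first loop (identical in the two Pythons): collect the non-None ranges
def pvBuildRanges (sensors beacons : List (Int × Int)) (line_y max_range : Int) : List (Int × Int) :=
  (List.zip sensors beacons).foldl (fun acc sb =>
    match pvGetIntersectionRange sb.1 sb.2 line_y max_range with
    | none => acc
    | some r => acc ++ [r]) []

-- A's fused loop: merge step by step over the sorted list, return at the first gap
def pvScanA (line_y : Int) (curr : Int × Int) : List (Int × Int) → Option (List Int)
  | [] => none
  | r :: rest =>
    if curr.2 + 1 < r.1 then some (PySem.Set.ofList [curr.2 + 1, line_y])
    else pvScanA line_y (curr.1, max curr.2 r.2) rest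

def get_beaconless_points_on_line_with_ranges (sensors : List (Int × Int)) (beacons : List (Int × Int)) (line_y : Int) (max_range : Int) : Option (List Int) :=
  match PySem.List.sorted (pvBuildRanges sensors beacons line_y max_range) (fun x => x.1) false with
  | [] => none  -- intersection_ranges[0] raises IndexError in Python; excluded by Pre_
  | curr :: rest => pvScanA line_y curr rest

-- ===== PORT B =====
-- one saturation pass of B's inner `for` loop: state is (end, changed)
def pvPass (rs : List (Int × Int)) (st : Int × Bool) : Int × Bool :=
  rs.foldl (fun st r => if r.1 ≤ st.1 + 1 ∧ st.1 < r.2 then (r.2, true) else st) st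

-- facts the `while changed` loop's termination needs (cited in decreasing_by)
theorem pvPass_fst_le (rs : List (Int × Int)) (st : Int × Bool) : st.1 ≤ (pvPass rs st).1 := by
  induction rs generalizing st with
  | nil => exact le_refl _
  | cons r rs ih =>
    simp only [pvPass, List.foldl_cons]
    split
    · next h => exact le_trans (le_of_lt h.2) (ih (r.2, true))
    · exact ih st

theorem pvPass_changed (rs : List (Int × Int)) (st : Int × Bool) (h : (pvPass rs st).2 = true) :
    st.2 = true ∨ (st.1 < (pvPass rs st).1 ∧ ∃ r ∈ rs, st.1 < r.2 ∧ r.2 ≤ (pvPass rs st).1) := by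
  induction rs generalizing st with
  | nil => exact Or.inl h
  | cons r rs ih =>
    simp only [pvPass, List.foldl_cons] at h ⊢
    by_cases hc : r.1 ≤ st.1 + 1 ∧ st.1 < r.2
    · rw [if_pos hc] at h ⊢
      right
      have hle : r.2 ≤ (pvPass rs (r.2, true)).1 := pvPass_fst_le rs (r.2, true)
      simp only [pvPass] at hle
      refine ⟨lt_of_lt_of_le hc.2 hle, r, List.mem_cons_self, hc.2, hle⟩
    · rw [if_neg hc] at h ⊢
      rcases ih st h with h1 | ⟨h1, w, hw, h2, h3⟩
      · exact Or.inl h1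
      · exact Or.inr ⟨h1, w, List.mem_cons_of_mem _ hw, h2, h3⟩

theorem pvCountP_lt (rs : List (Int × Int)) (e e1 : Int)
    (hw : ∃ r ∈ rs, e < r.2 ∧ r.2 ≤ e1) :
    rs.countP (fun r => decide (e1 < r.2)) < rs.countP (fun r => decide (e < r.2)) := by
  induction rs with
  | nil => simp at hw
  | cons r rs ih =>
    obtain ⟨w, hwmem, hw1, hw2⟩ := hw
    simp only [List.countP_cons]
    have hmono : List.countP (fun r => decide (e1 < r.2)) rs ≤ List.countP (fun r => decide (e < r.2)) rs :=
      List.countP_mono_left (by intro x _ hx; simp only [decide_eq_true_eq] at hx ⊢; omega)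
    rcases List.mem_cons.mp hwmem with rfl | hw'
    · have h1 : (decide (e1 < w.2) : Bool) = false := by simp only [decide_eq_false_iff_not]; omega
      have h2 : (decide (e < w.2) : Bool) = true := decide_eq_true hw1
      rw [h1, h2]
      simp only [Bool.false_eq_true, if_false, if_true]
      omega
    · have hstrict := ih ⟨w, hw', hw1, hw2⟩
      have hAB : (if (decide (e1 < r.2) : Bool) = true then 1 else 0) ≤ (if (decide (e < r.2) : Bool) = true then 1 else 0) := by
        by_cases hc : e1 < r.2
        · rw [if_pos (decide_eq_true hc), if_pos (decide_eq_true (show e < r.2 by omega))]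
        · rw [if_neg (by simp only [decide_eq_true_eq]; exact hc)]
          exact Nat.zero_le _
      omega

-- B's `while changed` loop; terminates because each changed pass strictly raises `end`
-- to the height of some interval, so the count of intervals above `end` drops
def pvSaturate (rs : List (Int × Int)) (e : Int) : Int :=
  let st := pvPass rs (e, false)
  if h : st.2 = true then pvSaturate rs st.1 else st.1
termination_by rs.countP (fun r => decide (e < r.2))
decreasing_by
  rcases pvPass_changed rs (e, false) h with h1 | ⟨h1, hw⟩
  · simp at h1
  · exact pvCountP_lt rs e _ hw

def get_beaconless_points_on_line_with_ranges_alt (sensors : List (Int × Int)) (beacons : List (Int × Int)) (line_y : Int) (max_range : Int) : Option (List Int) :=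
  let rs := pvBuildRanges sensors beacons line_y max_range
  match rs with
  | [] => none  -- ranges[0] raises IndexError in Python; excluded by Pre_
  | r0 :: rest =>
    -- seed: first interval with minimal start (B's explicit scan for the leftmost)
    let start := rest.foldl (fun best r => if r.1 < best.1 then r else best) r0
    match PySem.List.remove? rs start with
    | none => none  -- unreachable: start is an element of rs, list.remove cannot raise
    | some others =>
      let e := pvSaturate rs start.2
      if others.any (fun r => decide (e + 1 < r.1))
      then some (PySem.Set.ofList [e + 1, line_y]) else none

-- ===== PRECONDITION & SPEC =====
-- Pre_ excludes exactly the inputs where no sensor covers the line (the collected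
-- range list is empty), on which both Pythons raise IndexError at ranges[0].
def Pre_get_beaconless_points_on_line_with_ranges (sensors : List (Int × Int)) (beacons : List (Int × Int)) (line_y : Int) (max_range : Int) : Prop :=
  ∃ sb ∈ List.zip sensors beacons,
    |sb.1.2 - line_y| ≤ |sb.1.1 - sb.2.1| + |sb.1.2 - sb.2.2|
instance (sensors : List (Int × Int)) (beacons : List (Int × Int)) (line_y : Int) (max_range : Int) : Decidable (Pre_get_beaconless_points_on_line_with_ranges sensors beacons line_y max_range) := by unfold Pre_get_beaconless_points_on_line_with_ranges; infer_instance

def pvWitness_get_beaconless_points_on_line_with_ranges : (List (Int × Int)) × (List (Int × Int)) × Int × Int := ([(0, 0)], [(2, 0)], 1, 10)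

def Spec_get_beaconless_points_on_line_with_ranges (sensors : List (Int × Int)) (beacons : List (Int × Int)) (line_y : Int) (max_range : Int) (out : Option (List Int)) : Prop := out = get_beaconless_points_on_line_with_ranges_alt sensors beacons line_y max_range
instance (sensors : List (Int × Int)) (beacons : List (Int × Int)) (line_y : Int) (max_range : Int) (out : Option (List Int)) : Decidable (Spec_get_beaconless_points_on_line_with_ranges sensors beacons line_y max_range out) := by unfold Spec_get_beaconless_points_on_line_with_ranges; infer_instance

-- ===== CLAIM (what is proved, stated in full; the proofs are below) =====
def Claim_equal_get_beaconless_points_on_line_with_ranges : Prop := ∀ (sensors : List (Int × Int)) (beacons : List (Int × Int)) (line_y : Int) (max_range : Int), Dom_get_beaconless_points_on_line_with_ranges sensors beacons line_y max_range → Pre_get_beaconless_points_on_line_with_ranges sensors beacons line_y max_range → Spec_get_beaconless_points_on_line_with_ranges sensors beacons line_y max_range (get_beaconless_points_on_line_with_ranges sensors beacons line_y max_range)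

-- ===== LEMMAS AND PROOFS =====

-- `e` covers every interval that reaches it: no interval both touches [.., e+1] and sticks out
def pvFix (rs : List (Int × Int)) (e : Int) : Prop := ∀ r ∈ rs, r.1 ≤ e + 1 → r.2 ≤ e

theorem pvPass_snd_mono (rs : List (Int × Int)) (st : Int × Bool) (h : st.2 = true) :
    (pvPass rs st).2 = true := by
  induction rs generalizing st with
  | nil => exact h
  | cons r rs ih =>
    simp only [pvPass, List.foldl_cons]
    split
    · exact ih (r.2, true) rfl
    · exact ih st h

theorem pvPass_unchanged (rs : List (Int × Int)) (e : Int)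
    (h : (pvPass rs (e, false)).2 = false) :
    (pvPass rs (e, false)).1 = e ∧ pvFix rs e := by
  induction rs with
  | nil => exact ⟨rfl, by intro r hr; simp at hr⟩
  | cons r rs ih =>
    simp only [pvPass, List.foldl_cons] at h ⊢
    split at h
    · next hc => exact absurd (pvPass_snd_mono rs (r.2, true) rfl) (by simp [pvPass] at h ⊢; exact h)
    · next hc =>
      obtain ⟨h1, h2⟩ := ih (by simpa [pvPass] using h)
      split
      · next hc' => exact absurd hc' hc
      · refine ⟨h1, ?_⟩
        intro x hx hx1
        rcases List.mem_cons.mp hx with rfl | hx'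
        · by_contra hlt; exact hc ⟨hx1, by omega⟩
        · exact h2 x hx' hx1

theorem pvPass_le_of_fix (rs : List (Int × Int)) (st : Int × Bool) (e' : Int)
    (hle : st.1 ≤ e') (hfix : pvFix rs e') : (pvPass rs st).1 ≤ e' := by
  induction rs generalizing st with
  | nil => exact hle
  | cons r rs ih =>
    simp only [pvPass, List.foldl_cons]
    split
    · next hc =>
      exact ih (r.2, true) (hfix r List.mem_cons_self (by omega))
        (fun x hx => hfix x (List.mem_cons_of_mem _ hx))
    · exact ih st hle (fun x hx => hfix x (List.mem_cons_of_mem _ hx))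

theorem pvSaturate_ge (rs : List (Int × Int)) (e : Int) : e ≤ pvSaturate rs e := by
  induction e using pvSaturate.induct rs with
  | case1 e st hst ih =>
    rw [pvSaturate, dif_pos (show (pvPass rs (e, false)).2 = true from hst)]
    exact le_trans (pvPass_fst_le rs (e, false)) ih
  | case2 e st hst =>
    rw [pvSaturate, dif_neg (show ¬ (pvPass rs (e, false)).2 = true from hst)]
    exact pvPass_fst_le rs (e, false)

theorem pvSaturate_fix (rs : List (Int × Int)) (e : Int) : pvFix rs (pvSaturate rs e) := by
  induction e using pvSaturate.induct rs with
  | case1 e st hst ih =>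
    rw [pvSaturate, dif_pos (show (pvPass rs (e, false)).2 = true from hst)]
    exact ih
  | case2 e st hst =>
    rw [pvSaturate, dif_neg (show ¬ (pvPass rs (e, false)).2 = true from hst)]
    obtain ⟨h1, h2⟩ := pvPass_unchanged rs e (Bool.eq_false_iff.mpr hst)
    rw [h1]
    exact h2

theorem pvSaturate_min (rs : List (Int × Int)) (e e' : Int) (hle : e ≤ e') (hfix : pvFix rs e') :
    pvSaturate rs e ≤ e' := by
  revert hle
  induction e using pvSaturate.induct rs with
  | case1 e st hst ih =>
    rw [pvSaturate, dif_pos (show (pvPass rs (e, false)).2 = true from hst)]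
    exact fun hle2 => ih (pvPass_le_of_fix rs (e, false) e' hle2 hfix)
  | case2 e st hst =>
    rw [pvSaturate, dif_neg (show ¬ (pvPass rs (e, false)).2 = true from hst)]
    exact fun hle2 => pvPass_le_of_fix rs (e, false) e' hle2 hfix

-- A's sweep over a sorted tail equals the "gap after the saturated block" test:
-- E is any least fixpoint above the running end, and every ambient interval is
-- either already dominated by the running end or still ahead in the sweep.
theorem pvScanA_eq (y : Int) (rs : List (Int × Int)) (E : Int)
    (l : List (Int × Int)) (e a : Int)
    (hsorted : List.Pairwise (fun u v : Int × Int => u.1 ≤ v.1) l)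
    (hsub : ∀ r ∈ l, r ∈ rs)
    (hle : e ≤ E)
    (hfix : pvFix rs E)
    (hmin : ∀ e', e ≤ e' → pvFix rs e' → E ≤ e')
    (hinv : ∀ r ∈ rs, r.2 ≤ e ∨ r ∈ l) :
    pvScanA y (a, e) l =
      if l.any (fun g => decide (E + 1 < g.1)) then some (PySem.Set.ofList [E + 1, y]) else none := by
  induction l generalizing e a with
  | nil => simp [pvScanA]
  | cons r l ih =>
    simp only [pvScanA]
    by_cases hgap : e + 1 < r.1
    · have hEe : E = e := by
        have : pvFix rs e := by
          intro x hx hx1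
          rcases hinv x hx with h1 | h1
          · exact h1
          · rcases List.mem_cons.mp h1 with rfl | h2
            · omega
            · have := (List.pairwise_cons.mp hsorted).1 x h2
              omega
        exact le_antisymm (hmin e le_rfl this) hle
      have hany : (r :: l).any (fun g => decide (E + 1 < g.1)) = true := by
        simp only [List.any_cons, Bool.or_eq_true]
        exact Or.inl (by simp; omega)
      rw [if_pos hgap, hany, if_pos rfl, hEe]
    · have hr2 : r.2 ≤ E := hfix r (hsub r List.mem_cons_self) (by omega)
      have step := ih (List.pairwise_cons.mp hsorted).2
        (fun x hx => hsub x (List.mem_cons_of_mem _ hx))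
        (e := max e r.2) (a := a)
        (by omega)
        (fun e' he' hf => hmin e' (by omega) hf)
        (by
          intro x hx
          rcases hinv x hx with h1 | h1
          · exact Or.inl (by omega)
          · rcases List.mem_cons.mp h1 with rfl | h2
            · exact Or.inl (by omega)
            · exact Or.inr h2)
      rw [if_neg hgap, step]
      have hrfalse : (decide (E + 1 < r.1) : Bool) = false := by simp only [decide_eq_false_iff_not]; omega
      rw [List.any_cons, hrfalse, Bool.false_or]

-- the head of Python's stable sort is the first interval with minimal start,
-- i.e. exactly B's strict-improvement fold
theorem pvInsertFold_head (l : List (Int × Int)) (a : Int × Int) (acc : List (Int × Int)) :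
    ∃ t, List.foldl (fun acc x => PySem.List.insertBy (fun u v : Int × Int => decide (u.1 < v.1)) x acc) (a :: acc) l
      = (l.foldl (fun best r => if r.1 < best.1 then r else best) a) :: t := by
  induction l generalizing a acc with
  | nil => exact ⟨acc, rfl⟩
  | cons x l ih =>
    simp only [List.foldl_cons, PySem.List.insertBy]
    by_cases hx : x.1 < a.1
    · simp only [hx, decide_true, if_true]
      exact ih x (a :: acc)
    · simp only [hx, decide_false, if_false]
      exact ih a _

theorem pvFoldBest_mem (l : List (Int × Int)) (a : Int × Int) :
    l.foldl (fun best r => if r.1 < best.1 then r else best) a ∈ a :: l := by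
  induction l generalizing a with
  | nil => exact List.mem_cons_self
  | cons x l ih =>
    simp only [List.foldl_cons]
    split
    · exact List.mem_cons_of_mem _ (ih x)
    · rcases List.mem_cons.mp (ih a) with h | h
      · rw [h]; exact List.mem_cons_self
      · exact List.mem_cons_of_mem _ (List.mem_cons_of_mem _ h)

theorem pvRemove?_erase (rs : List (Int × Int)) (c : Int × Int) (h : c ∈ rs) :
    PySem.List.remove? rs c = some (rs.erase c) := by
  obtain ⟨k, hk⟩ := Option.isSome_iff_exists.mp (List.isSome_idxOf?.mpr h)
  have hidx : List.idxOf c rs = k := by rw [List.idxOf_eq_getD_idxOf?, hk]; rfl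
  simp [PySem.List.remove?, hk, List.erase_eq_eraseIdx_of_idxOf hidx]

theorem pvFold_ne_nil_of_acc (line_y max_range : Int) (l : List ((Int × Int) × (Int × Int))) (acc : List (Int × Int)) (h : acc ≠ []) :
    l.foldl (fun acc sb =>
      match pvGetIntersectionRange sb.1 sb.2 line_y max_range with
      | none => acc
      | some r => acc ++ [r]) acc ≠ [] := by
  induction l generalizing acc with
  | nil => exact h
  | cons sb l ih =>
    simp only [List.foldl_cons]
    cases pvGetIntersectionRange sb.1 sb.2 line_y max_range with
    | none => exact ih acc h
    | some r => exact ih (acc ++ [r]) (by simp)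

theorem pvFold_ne_nil (line_y max_range : Int) (l : List ((Int × Int) × (Int × Int))) (acc : List (Int × Int))
    (h : ∃ sb ∈ l, |sb.1.2 - line_y| ≤ |sb.1.1 - sb.2.1| + |sb.1.2 - sb.2.2|) :
    l.foldl (fun acc sb =>
      match pvGetIntersectionRange sb.1 sb.2 line_y max_range with
      | none => acc
      | some r => acc ++ [r]) acc ≠ [] := by
  induction l generalizing acc with
  | nil => simp at h
  | cons sb l ih =>
    simp only [List.foldl_cons]
    obtain ⟨x, hx, hc⟩ := h
    rcases List.mem_cons.mp hx with rfl | hx'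
    · have hsome : pvGetIntersectionRange x.1 x.2 line_y max_range =
        some (max 0 (x.1.1 - pvManhattan x.1 x.2 + |x.1.2 - line_y|),
              min max_range (x.1.1 + pvManhattan x.1 x.2 - |x.1.2 - line_y|)) := by
        simp only [pvGetIntersectionRange]
        split
        · next hgt => exact absurd hgt (by simp only [pvManhattan, gt_iff_lt, not_lt]; exact hc)
        · rfl
      rw [hsome]
      exact pvFold_ne_nil_of_acc line_y max_range l _ (by simp)
    · cases pvGetIntersectionRange sb.1 sb.2 line_y max_range with
      | none => exact ih acc ⟨x, hx', hc⟩
      | some r => exact ih _ ⟨x, hx', hc⟩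

theorem pvBuildRanges_ne_nil (sensors beacons : List (Int × Int)) (line_y max_range : Int)
    (h : Pre_get_beaconless_points_on_line_with_ranges sensors beacons line_y max_range) :
    pvBuildRanges sensors beacons line_y max_range ≠ [] :=
  pvFold_ne_nil line_y max_range _ [] h

-- ===== VERDICT (by name: the statement is the Claim_ definition above) =====
theorem get_beaconless_points_on_line_with_ranges_spec : Claim_equal_get_beaconless_points_on_line_with_ranges := by
  intro sensors beacons line_y max_range _ hpre
  unfold Spec_get_beaconless_points_on_line_with_ranges
  unfold get_beaconless_points_on_line_with_ranges get_beaconless_points_on_line_with_ranges_alt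
  have hne := pvBuildRanges_ne_nil sensors beacons line_y max_range hpre
  cases hrs : pvBuildRanges sensors beacons line_y max_range with
  | nil => exact absurd hrs hne
  | cons r0 rest =>
    have hmem : (rest.foldl (fun best r => if r.1 < best.1 then r else best) r0) ∈ (r0 :: rest) :=
      pvFoldBest_mem rest r0
    obtain ⟨t, ht⟩ : ∃ t, PySem.List.sorted (r0 :: rest) (fun x : Int × Int => x.1) false
        = (rest.foldl (fun best r => if r.1 < best.1 then r else best) r0) :: t := by
      rw [PySem.List.sorted_eq_foldl_insertBy]
      simpa [PySem.List.insertBy] using pvInsertFold_head rest r0 []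
    rw [ht]
    simp only [pvRemove?_erase (r0 :: rest) _ hmem]
    generalize hstartdef : rest.foldl (fun best r => if r.1 < best.1 then r else best) r0 = start at ht hmem ⊢
    have hperm : (start :: t).Perm (r0 :: rest) := ht ▸ PySem.List.sorted_perm (r0 :: rest) (fun x : Int × Int => x.1) false
    have hperm2 : t.Perm ((r0 :: rest).erase start) :=
      (hperm.trans (List.perm_cons_erase hmem)).cons_inv
    have hpw : List.Pairwise (fun u v : Int × Int => u.1 ≤ v.1) (start :: t) :=
      ht ▸ PySem.List.sorted_pairwise (r0 :: rest) (fun x : Int × Int => x.1)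
    have hscan := pvScanA_eq line_y (r0 :: rest) (pvSaturate (r0 :: rest) start.2) t start.2 start.1
      (List.pairwise_cons.mp hpw).2
      (fun x hx => hperm.mem_iff.mp (List.mem_cons_of_mem _ hx))
      (pvSaturate_ge (r0 :: rest) start.2)
      (pvSaturate_fix (r0 :: rest) start.2)
      (fun e' he' hf => pvSaturate_min (r0 :: rest) start.2 e' he' hf)
      (by
        intro x hx
        rcases List.mem_cons.mp (hperm.mem_iff.mpr hx) with rfl | h2
        · exact Or.inl le_rfl
        · exact Or.inr h2)
    rw [show ((start.1, start.2) : Int × Int) = start from rfl] at hscan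
    rw [hscan, hperm2.any_eq]
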